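-- pv_equiv track=rewrite | github.com/huyhuynh2210/Codeforces | Round794.Div2/b.py | solve
-- ===== SOURCE A (Python) =====
-- def solve(n,ar):
--     count = 0
--     i=0
--     while i<n-1:
--         if ar[i]>ar[i+1]:
--             count +=1
--             i+=1
--         i+=1
--     return count
-- ===== SOURCE B (Python) =====
-- def solve(n, ar):
--     # Run-length counting: each maximal run of L consecutive strict descents
--     # contributes ceil(L/2) non-overlapping descent pairs (the greedy pick
--     # takes every other descent of the run). One pass maintaining the run length.
--     count = 0
--     run = 0
--     for i in range(n - 1):
--         if ar[i] > ar[i + 1]: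
--             run += 1
--         else:
--             count += (run + 1) // 2
--             run = 0
--     return count + (run + 1) // 2
-- ===== Notes on version B (the rewrite author's own statement) =====
-- stated objective: alternative
-- what changed: Replaces A's greedy index-stepping while loop (jump i by 2 after each counted descent) by run-length counting: one pass maintains the length L of the current maximal run of consecutive descents and adds the closed form ceil(L/2) each time a run ends.
-- outside the precondition, e.g. on solve(3, [4, -1]): A returns 1, B raises IndexError
import Mathlib
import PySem

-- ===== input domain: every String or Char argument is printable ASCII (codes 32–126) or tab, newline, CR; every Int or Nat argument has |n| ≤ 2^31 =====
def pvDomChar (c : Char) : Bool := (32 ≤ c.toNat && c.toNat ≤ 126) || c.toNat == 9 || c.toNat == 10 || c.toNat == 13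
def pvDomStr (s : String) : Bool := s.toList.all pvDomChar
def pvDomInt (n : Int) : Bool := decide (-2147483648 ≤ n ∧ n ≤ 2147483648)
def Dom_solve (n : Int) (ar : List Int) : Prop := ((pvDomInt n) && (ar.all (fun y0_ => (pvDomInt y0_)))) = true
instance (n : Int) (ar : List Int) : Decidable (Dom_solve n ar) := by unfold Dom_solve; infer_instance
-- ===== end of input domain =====

-- B replaces A's index-jumping greedy loop by run-length counting (ceil(L/2) per maximal
-- run of consecutive descents); same cost, different algorithm.

-- ===== PORT A =====
-- the while loop; fuel n.toNat bounds the number of iterations (i grows by ≥ 1 while i < n-1)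
def solveGo (ar : List Int) (n : Int) (i count : Int) : Nat → Int
  | 0 => count
  | fuel + 1 =>
    if i < n - 1 then
      if (PySem.List.pyGet? ar i).getD 0 > (PySem.List.pyGet? ar (i + 1)).getD 0 then
        solveGo ar n (i + 2) (count + 1) fuel
      else
        solveGo ar n (i + 1) count fuel
    else count

def solve (n : Int) (ar : List Int) : Int := solveGo ar n 0 0 n.toNat

-- ===== PORT B =====
def solve_alt (n : Int) (ar : List Int) : Int :=
  let st := (PySem.List.pyRange 0 (n - 1) 1).foldl
    (fun (st : Int × Int) i =>
      if (PySem.List.pyGet? ar i).getD 0 > (PySem.List.pyGet? ar (i + 1)).getD 0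
      then (st.1, st.2 + 1)
      else (st.1 + PySem.Int.floordiv (st.2 + 1) 2, 0)) (0, 0)
  st.1 + PySem.Int.floordiv (st.2 + 1) 2

-- ===== PRECONDITION & SPEC =====
-- Pre_ excludes inputs with n > len(ar) (and n ≥ 2): A usually raises IndexError there, and on the
-- rare such inputs where its skip-by-2 jumps past the out-of-range index and it still returns
-- (e.g. (3, [4, -1]) → 1), that value is an accident of running past the list, which B cannot
-- sensibly reproduce (B itself raises IndexError there).
def Pre_solve (n : Int) (ar : List Int) : Prop := n ≤ (ar.length : Int) ∨ n ≤ 1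
instance (n : Int) (ar : List Int) : Decidable (Pre_solve n ar) := by unfold Pre_solve; infer_instance
def pvWitness_solve : Int × List Int := (4, [3, 2, 5, 1])

def Spec_solve (n : Int) (ar : List Int) (out : Int) : Prop := out = solve_alt n ar
instance (n : Int) (ar : List Int) (out : Int) : Decidable (Spec_solve n ar out) := by unfold Spec_solve; infer_instance

-- ===== CLAIM (what is proved, stated in full; the proofs are below) =====
def Claim_equal_solve : Prop := ∀ (n : Int) (ar : List Int), Dom_solve n ar → Pre_solve n ar → Spec_solve n ar (solve n ar)

-- ===== LEMMAS AND PROOFS =====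

def stepB (ar : List Int) : Int × Int → Int → Int × Int := fun st i =>
  if (PySem.List.pyGet? ar i).getD 0 > (PySem.List.pyGet? ar (i + 1)).getD 0
  then (st.1, st.2 + 1) else (st.1 + PySem.Int.floordiv (st.2 + 1) 2, 0)

-- the value B computes when the remaining indices are l and the state is st
def outB (ar : List Int) (l : List Int) (st : Int × Int) : Int :=
  let r := l.foldl (stepB ar) st
  r.1 + PySem.Int.floordiv (r.2 + 1) 2

theorem fdiv_shift (r : Int) :
    PySem.Int.floordiv (r + 2 + 1) 2 = PySem.Int.floordiv (r + 1) 2 + 1 := by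
  rw [PySem.Int.floordiv_eq_ediv_of_pos (by norm_num),
      PySem.Int.floordiv_eq_ediv_of_pos (by norm_num)]
  omega

-- splitting an even prefix off the current run: two pending descents = one counted pair
theorem outB_shift (ar : List Int) (l : List Int) :
    ∀ c r, outB ar l (c, r + 2) = outB ar l (c + 1, r) := by
  induction l with
  | nil =>
    intro c r
    simp only [outB, List.foldl_nil]
    rw [fdiv_shift]; ring
  | cons x xs ih =>
    intro c r
    simp only [outB, List.foldl_cons] at *
    by_cases hd : (PySem.List.pyGet? ar x).getD 0 > (PySem.List.pyGet? ar (x + 1)).getD 0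
    · have h1 : stepB ar (c, r + 2) x = (c, r + 2 + 1) := by simp [stepB, hd]
      have h2 : stepB ar (c + 1, r) x = (c + 1, r + 1) := by simp [stepB, hd]
      rw [h1, h2]
      have := ih c (r + 1)
      simpa [outB, show r + 1 + 2 = r + 2 + 1 by ring] using this
    · have h1 : stepB ar (c, r + 2) x = (c + PySem.Int.floordiv (r + 2 + 1) 2, 0) := by
        simp [stepB, hd]
      have h2 : stepB ar (c + 1, r) x = (c + 1 + PySem.Int.floordiv (r + 1) 2, 0) := by
        simp [stepB, hd]
      rw [h1, h2, fdiv_shift]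
      ring_nf

theorem outB_nil_state (ar : List Int) (l : List Int) (c : Int)
    (h : l = []) : outB ar l (c, 0) = c := by
  subst h
  simp [outB, PySem.Int.floordiv]

theorem main_lemma (ar : List Int) (n : Int) :
    ∀ (fuel : Nat) (a count : Int), (n - 1 - a).toNat ≤ fuel →
      solveGo ar n a count fuel = outB ar (PySem.List.pyRange a (n - 1) 1) (count, 0) := by
  intro fuel
  induction fuel with
  | zero =>
    intro a count hf
    have hend : PySem.List.pyRange a (n - 1) 1 = [] := by
      rw [PySem.List.pyRange_one a (n - 1)]
      have : (n - 1 - a).toNat = 0 := by omega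
      simp [this]
    rw [outB_nil_state ar _ count hend]
    simp [solveGo]
  | succ fuel ih =>
    intro a count hf
    by_cases hlt : a < n - 1
    · rw [PySem.List.pyRange_one_cons hlt]
      by_cases hd : (PySem.List.pyGet? ar a).getD 0 > (PySem.List.pyGet? ar (a + 1)).getD 0
      · -- A counts and jumps to a+2; B's run becomes 1
        simp only [solveGo, if_pos hlt, if_pos hd]
        have h1 : stepB ar (count, 0) a = (count, 1) := by simp [stepB, hd]
        by_cases hlt1 : a + 1 < n - 1
        · rw [PySem.List.pyRange_one_cons hlt1]
          simp only [outB, List.foldl_cons, h1]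
          by_cases hd1 : (PySem.List.pyGet? ar (a+1)).getD 0 > (PySem.List.pyGet? ar (a+1+1)).getD 0
          · have h2 : stepB ar (count, 1) (a + 1) = (count, 2) := by simp [stepB, hd1]
            rw [h2]
            have hs := outB_shift ar (PySem.List.pyRange (a + 1 + 1) (n - 1) 1) count 0
            simp only [outB] at hs
            rw [show (0:Int) + 2 = 2 by ring] at hs
            rw [hs]
            have := ih (a + 2) (count + 1) (by omega)
            simp only [outB, show a + 1 + 1 = a + 2 by ring] at *
            exact this
          · have h2 : stepB ar (count, 1) (a + 1) =
                (count + PySem.Int.floordiv 2 2, 0) := by simp [stepB, hd1]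
            have hfd : PySem.Int.floordiv 2 2 = 1 := by decide
            rw [h2, hfd]
            have := ih (a + 2) (count + 1) (by omega)
            simp only [outB, show a + 1 + 1 = a + 2 by ring] at *
            exact this
        · -- the range ends right after a: pending run of length 1 is counted at the tail
          have hend : PySem.List.pyRange (a + 1) (n - 1) 1 = [] := by
            rw [PySem.List.pyRange_one (a + 1) (n - 1)]
            have : (n - 1 - (a + 1)).toNat = 0 := by omega
            simp [this]
          rw [hend]
          simp only [outB, List.foldl_cons, List.foldl_nil, h1]
          have hend2 : PySem.List.pyRange (a + 2) (n - 1) 1 = [] := by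
            rw [PySem.List.pyRange_one (a + 2) (n - 1)]
            have : (n - 1 - (a + 2)).toNat = 0 := by omega
            simp [this]
          rw [ih (a + 2) (count + 1) (by omega), outB_nil_state ar _ (count + 1) hend2]
          have : PySem.Int.floordiv (1 + 1 : Int) 2 = 1 := by decide
          rw [this]
      · -- no descent at a: B closes an empty run (adds 0) and both step to a+1
        simp only [solveGo, if_pos hlt, if_neg hd]
        have h1 : stepB ar (count, 0) a = (count + PySem.Int.floordiv 1 2, 0) := by
          simp [stepB, hd]
        have hfd : PySem.Int.floordiv 1 2 = 0 := by decide
        simp only [outB, List.foldl_cons, h1, hfd, add_zero]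
        exact ih (a + 1) count (by omega)
    · have hend : PySem.List.pyRange a (n - 1) 1 = [] := by
        rw [PySem.List.pyRange_one a (n - 1)]
        have : (n - 1 - a).toNat = 0 := by omega
        simp [this]
      rw [outB_nil_state ar _ count hend]
      simp [solveGo, hlt]

-- ===== VERDICT (by name: the statement is the Claim_ definition above) =====
theorem solve_spec : Claim_equal_solve := by
  intro n ar _ _
  unfold Spec_solve solve solve_alt
  rw [main_lemma ar n n.toNat 0 0 (by omega)]
  rfl
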